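-- pv_equiv track=rewrite | github.com/hyoinandout/problem-solving | pstest1.py | dfs
-- ===== SOURCE A (Python) =====
-- def dfs(n,capacity,files,visited,cnt,cap):
--     if n <= 0:
--         return cnt-1
--     result = 0
--     for i in range(len(files)):
--         if visited[i] == False:
--             if files[i] <= capacity:
--                 visited[i] = True
--                 result = max(result,dfs(n,capacity-files[i],files,visited,cnt+1,cap))
--                 visited[i] = False
--             else:
--                 visited[i] = True
--                 result = max(result,dfs(n-1,cap-files[i],files,visited,cnt+1,cap))
--                 visited[i] = False
--     return result
-- ===== SOURCE B (Python) =====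
-- # B: recursion over a shrinking list of remaining (unvisited) files instead of an
-- # index loop over the full list with mutable visited flags; B never mutates visited.
-- def dfs(n, capacity, files, visited, cnt, cap):
--     rem = [f for f, v in zip(files, visited) if not v]
--     return _pack(n, capacity, rem, cnt, cap)
--
-- def _pack(n, capacity, rem, cnt, cap):
--     if n <= 0:
--         return cnt - 1
--     best = 0
--     for j in range(len(rem)):
--         f = rem[j]
--         rest = rem[:j] + rem[j+1:]
--         if f <= capacity:
--             best = max(best, _pack(n, capacity - f, rest, cnt + 1, cap))
--         else:
--             best = max(best, _pack(n - 1, cap - f, rest, cnt + 1, cap))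
--     return best
-- ===== Notes on version B (the rewrite author's own statement) =====
-- stated objective: alternative
-- what changed: B replaces A's index loop over the full files list with mutable visited flags (set/unset around each recursive call) by a pure recursion over a shrinking list of the remaining unvisited files, built once up front; no mutation of visited at all.
import Mathlib
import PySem

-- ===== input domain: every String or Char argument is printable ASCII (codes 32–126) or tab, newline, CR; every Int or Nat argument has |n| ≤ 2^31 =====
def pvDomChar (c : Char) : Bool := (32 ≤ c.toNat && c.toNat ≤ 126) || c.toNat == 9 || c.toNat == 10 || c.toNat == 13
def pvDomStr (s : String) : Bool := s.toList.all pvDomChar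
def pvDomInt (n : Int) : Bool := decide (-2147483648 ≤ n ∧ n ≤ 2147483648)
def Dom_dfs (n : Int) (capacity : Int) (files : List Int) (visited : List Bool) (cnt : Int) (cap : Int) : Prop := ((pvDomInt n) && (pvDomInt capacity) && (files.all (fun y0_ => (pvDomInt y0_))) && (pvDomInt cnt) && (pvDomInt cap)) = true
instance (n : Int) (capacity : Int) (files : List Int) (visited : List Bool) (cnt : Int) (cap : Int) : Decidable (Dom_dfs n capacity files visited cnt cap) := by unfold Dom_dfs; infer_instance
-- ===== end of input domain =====

-- B replaces A's index loop with mutable visited flags by pure recursion over the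
-- shrinking list of remaining unvisited files (objective: alternative structure; A
-- temporarily mutates `visited` but restores it, so neither leaves a net mutation).

-- A-side termination helper (cited in decreasing_by): marking a false flag true
-- strictly decreases the number of false flags.
theorem pv_count_set_lt (v : List Bool) (i : Nat) (h : v[i]? = some false) :
    (v.set i true).count false < v.count false := by
  induction v generalizing i with
  | nil => simp at h
  | cons b t ih =>
    cases i with
    | zero =>
      simp at h
      subst h
      simp
    | succ j =>
      simp at h
      have := ih j h
      simp [List.count_cons]
      omega

-- ===== PORT A =====
-- Literal port of A. The loop `for i in range(len(files))` becomes the index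
-- recursion dfsAGo; `visited[i] = True` … `visited[i] = False` around a recursive
-- call becomes passing `visited.set i true` to that call (net list unchanged, as in A).
-- `visited[i]` is read with getElem? (exact for the nonnegative indices range yields);
-- the `none` (IndexError) case is outside Pre_dfs and returns the accumulator.
mutual
def dfs (n : Int) (capacity : Int) (files : List Int) (visited : List Bool) (cnt : Int) (cap : Int) : Int :=
  if n ≤ 0 then cnt - 1
  else dfsAGo n capacity files visited cnt cap 0 0
termination_by (visited.count false, files.length + 1)

def dfsAGo (n : Int) (capacity : Int) (files : List Int) (visited : List Bool) (cnt : Int) (cap : Int) (i : Nat) (result : Int) : Int :=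
  if hi : i < files.length then
    let result' :=
      match hv : visited[i]? with
      | none => result  -- Python raises IndexError here; excluded by Pre_dfs
      | some v =>
        if v = false then
          if files[i] ≤ capacity then
            max result (dfs n (capacity - files[i]) files (visited.set i true) (cnt + 1) cap)
          else
            max result (dfs (n - 1) (cap - files[i]) files (visited.set i true) (cnt + 1) cap)
        else result
    dfsAGo n capacity files visited cnt cap (i + 1) result'
  else result
termination_by (visited.count false, files.length - i)
decreasing_by
  · exact Prod.Lex.left _ _ (by subst_vars; exact pv_count_set_lt visited i (by simp [hv]))
  · exact Prod.Lex.left _ _ (by subst_vars; exact pv_count_set_lt visited i (by simp [hv]))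
  · exact Prod.Lex.right _ (by omega)
end

-- ===== PORT B =====
-- Literal port of Source B. `[f for f, v in zip(files, visited) if not v]` :
def remOf (files : List Int) (visited : List Bool) : List Int :=
  ((files.zip visited).filter (fun p => !p.2)).map Prod.fst

-- `_pack`; the loop over j becomes the index recursion packGo;
-- `rem[:j] + rem[j+1:]` is List.eraseIdx j.
mutual
def pack (n : Int) (capacity : Int) (rem : List Int) (cnt : Int) (cap : Int) : Int :=
  if n ≤ 0 then cnt - 1
  else packGo n capacity rem cnt cap 0 0
termination_by (rem.length, rem.length + 1)

def packGo (n : Int) (capacity : Int) (rem : List Int) (cnt : Int) (cap : Int) (j : Nat) (best : Int) : Int :=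
  if hj : j < rem.length then
    let f := rem[j]
    let rest := rem.eraseIdx j
    let best' :=
      if f ≤ capacity then max best (pack n (capacity - f) rest (cnt + 1) cap)
      else max best (pack (n - 1) (cap - f) rest (cnt + 1) cap)
    packGo n capacity rem cnt cap (j + 1) best'
  else best
termination_by (rem.length, rem.length - j)
decreasing_by
  · exact Prod.Lex.left _ _ (by simp [List.length_eraseIdx, hj]; omega)
  · exact Prod.Lex.left _ _ (by simp [List.length_eraseIdx, hj]; omega)
  · exact Prod.Lex.right _ (by omega)
end

def dfs_alt (n : Int) (capacity : Int) (files : List Int) (visited : List Bool) (cnt : Int) (cap : Int) : Int :=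
  pack n capacity (remOf files visited) cnt cap

-- ===== PRECONDITION & SPEC =====
-- Pre_dfs excludes exactly the inputs where A raises IndexError: with n > 0 the loop
-- indexes visited[i] for every i < len(files), so visited must be at least as long
-- as files (with n ≤ 0 A returns cnt-1 before touching the lists).
def Pre_dfs (n : Int) (capacity : Int) (files : List Int) (visited : List Bool) (cnt : Int) (cap : Int) : Prop :=
  n ≤ 0 ∨ files.length ≤ visited.length
instance (n : Int) (capacity : Int) (files : List Int) (visited : List Bool) (cnt : Int) (cap : Int) : Decidable (Pre_dfs n capacity files visited cnt cap) := by unfold Pre_dfs; infer_instance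

def pvWitness_dfs : Int × Int × List Int × List Bool × Int × Int :=
  (2, 10, [3, 5, 12], [false, false, false], 1, 10)

def Spec_dfs (n : Int) (capacity : Int) (files : List Int) (visited : List Bool) (cnt : Int) (cap : Int) (out : Int) : Prop := out = dfs_alt n capacity files visited cnt cap
instance (n : Int) (capacity : Int) (files : List Int) (visited : List Bool) (cnt : Int) (cap : Int) (out : Int) : Decidable (Spec_dfs n capacity files visited cnt cap out) := by unfold Spec_dfs; infer_instance

-- ===== CLAIM (what is proved, stated in full; the proofs are below) =====
def Claim_equal_dfs : Prop := ∀ (n : Int) (capacity : Int) (files : List Int) (visited : List Bool) (cnt : Int) (cap : Int), Dom_dfs n capacity files visited cnt cap → Pre_dfs n capacity files visited cnt cap → Spec_dfs n capacity files visited cnt cap (dfs n capacity files visited cnt cap)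

-- ===== LEMMAS AND PROOFS =====

-- files.zip (visited with flag i set) = (files.zip visited) with entry i set
theorem pv_zip_set : ∀ (files : List Int) (visited : List Bool) (i : Nat)
    (h1 : i < files.length), i < visited.length →
    files.zip (visited.set i true) = (files.zip visited).set i (files[i], true) := by
  intro files
  induction files with
  | nil => intro v i h1; simp at h1
  | cons a t ih =>
    intro v i h1 h2
    cases v with
    | nil => simp at h2
    | cons b w =>
      cases i with
      | zero => simp
      | succ i =>
        simp at h1 h2
        simp [ih w i h1 h2]

-- Position correspondence: for z with z[i].2 = false, the number j of kept entries
-- before i is a valid position in F := map fst (filter (!·.2) z), F[j] is z[i].1,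
-- and deleting position j of F is F of z with entry i marked true.
theorem pv_rem_facts : ∀ (z : List (Int × Bool)) (i : Nat) (hi : i < z.length),
    z[i].2 = false →
    ((z.take i).countP (fun q => !q.2) < ((z.filter (fun q => !q.2)).map Prod.fst).length
    ∧ ((z.filter (fun q => !q.2)).map Prod.fst)[(z.take i).countP (fun q => !q.2)]? = some z[i].1
    ∧ ((z.filter (fun q => !q.2)).map Prod.fst).eraseIdx ((z.take i).countP (fun q => !q.2))
        = ((z.set i (z[i].1, true)).filter (fun q => !q.2)).map Prod.fst) := by
  intro z
  induction z with
  | nil => intro i hi; simp at hi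
  | cons q t ih =>
    obtain ⟨a, b⟩ := q
    intro i hi hf
    cases i with
    | zero =>
      simp at hf; subst hf
      simp [List.filter_cons]
    | succ i =>
      simp at hi hf
      obtain ⟨h1, h2, h3⟩ := ih i hi hf
      cases b with
      | false =>
        simp only [List.take_succ_cons, List.countP_cons, List.filter_cons,
          List.getElem_cons_succ, List.set_cons_succ, Bool.not_false, if_true,
          List.map_cons, List.length_cons, List.getElem?_cons_succ,
          List.eraseIdx_cons_succ]
        exact ⟨by omega, h2, by rw [h3]⟩
      | true =>
        simp only [List.take_succ_cons, List.countP_cons, List.filter_cons,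
          List.getElem_cons_succ, List.set_cons_succ, Bool.not_true, if_false]
        exact ⟨h1, h2, h3⟩

-- how the kept-count j changes when the loop advances past index i
theorem pv_j_succ (z : List (Int × Bool)) (i : Nat) (hi : i < z.length) :
    (z.take (i + 1)).countP (fun q => !q.2)
      = (z.take i).countP (fun q => !q.2) + (if z[i].2 then 0 else 1) := by
  rw [List.take_add_one, List.countP_append, List.getElem?_eq_getElem hi]
  cases hb : z[i].2 <;> simp [hb]

theorem dfs_pack_eq (files : List Int) :
    ∀ (c : Nat) (visited : List Bool), visited.count false = c →
      files.length ≤ visited.length →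
      ∀ (n capacity cnt cap : Int),
        dfs n capacity files visited cnt cap = pack n capacity (remOf files visited) cnt cap := by
  intro c
  induction c using Nat.strong_induction_on with
  | _ c IH =>
    intro visited hc hlen n capacity cnt cap
    have hzlen : (files.zip visited).length = files.length := by
      simp [List.length_zip]; omega
    rw [dfs, pack]
    by_cases hn : n ≤ 0
    · simp [hn]
    · simp only [if_neg hn]
      have loop : ∀ (d i : Nat), files.length - i = d →
          ∀ (n capacity cnt cap result : Int),
            dfsAGo n capacity files visited cnt cap i result
              = packGo n capacity (remOf files visited) cnt cap
                  (((files.zip visited).take i).countP (fun q => !q.2)) result := by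
        intro d
        induction d with
        | zero =>
          intro i hid n capacity cnt cap result
          have hge : ¬ i < files.length := by omega
          have htake : (files.zip visited).take i = files.zip visited :=
            List.take_of_length_le (by omega)
          rw [dfsAGo, packGo]
          have hj : ¬ ((files.zip visited).take i).countP (fun q => !q.2)
              < (remOf files visited).length := by
            simp [htake, remOf, List.countP_eq_length_filter]
          simp [hge, hj]
        | succ d ihd =>
          intro i hid n capacity cnt cap result
          have hi : i < files.length := by omega
          have hiv : i < visited.length := by omega
          have hiz : i < (files.zip visited).length := by omega
          have hzi : (files.zip visited)[i] = (files[i], visited[i]) := List.getElem_zip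
          have hsome : visited[i]? = some visited[i] := List.getElem?_eq_getElem hiv
          rw [dfsAGo]
          simp only [dif_pos hi]
          split
          next hv => rw [hsome] at hv; exact absurd hv (by simp)
          next v hv =>
          rw [hsome] at hv
          cases Option.some.inj hv
          rw [ihd (i + 1) (by omega), pv_j_succ (files.zip visited) i hiz, hzi]
          cases hvb : visited[i] with
          | true =>
            simp [hvb]
          | false =>
            simp only [hvb, Bool.false_eq_true, if_false, if_true]
            obtain ⟨h1, h2, h3⟩ := pv_rem_facts (files.zip visited) i hiz (by rw [hzi, hvb])
            simp only [hzi] at h2 h3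
            have hj : ((files.zip visited).take i).countP (fun q => !q.2)
                < (remOf files visited).length := by rw [remOf]; exact h1
            have h2' : (remOf files visited)[((files.zip visited).take i).countP (fun q => !q.2)]? = some files[i] := by
              rw [remOf]; exact h2
            have hfj : (remOf files visited)[((files.zip visited).take i).countP (fun q => !q.2)]'hj = files[i] := by
              rw [List.getElem?_eq_getElem hj] at h2'
              exact Option.some.inj h2'
            have hrem : remOf files (visited.set i true) = (remOf files visited).eraseIdx
                (((files.zip visited).take i).countP (fun q => !q.2)) := by
              rw [remOf, pv_zip_set files visited i hi hiv, remOf]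
              exact h3.symm
            have hcount : (visited.set i true).count false < c :=
              hc ▸ pv_count_set_lt visited i (by rw [List.getElem?_eq_getElem hiv, hvb])
            have hdfs : ∀ (n' capacity' cnt' : Int),
                dfs n' capacity' files (visited.set i true) cnt' cap
                  = pack n' capacity' ((remOf files visited).eraseIdx
                      (((files.zip visited).take i).countP (fun q => !q.2))) cnt' cap := by
              intro n' capacity' cnt'
              rw [IH _ hcount _ rfl (by simpa using hlen), hrem]
            conv_rhs => rw [packGo]
            simp only [dif_pos hj, hfj, if_false]
            norm_num
            congr 1
            by_cases hcap : files[i] ≤ capacity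
            · simp only [if_pos hcap, hdfs]
            · simp only [if_neg hcap, hdfs]
      have h0 := loop files.length 0 (by omega) n capacity cnt cap 0
      simpa using h0

-- ===== VERDICT (by name: the statement is the Claim_ definition above) =====
theorem dfs_spec : Claim_equal_dfs := by
  intro n capacity files visited cnt cap _ hpre
  unfold Spec_dfs dfs_alt
  rcases hpre with h | h
  · rw [dfs, pack]; simp [h]
  · exact dfs_pack_eq files _ visited rfl h n capacity cnt cap
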